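-- pv_equiv track=rewrite | github.com/Casper-Guo/AoC-Language-Exploration | 2015.py/day05.py | repeat_twice
-- ===== SOURCE A (Python) =====
-- from itertools import pairwise
--
-- def repeat_twice(input: str) -> bool:
--     pairs = {}
--
--     for idx, pair in enumerate(pairwise(input)):
--         if pair in pairs:
--             if pairs[pair] != idx - 1:
--                 return True
--         else:
--             pairs[pair] = idx
--
--     return False
-- ===== SOURCE B (Python) =====
-- def repeat_twice(input: str) -> bool:
--     rest = input
--     while len(rest) >= 2:
--         if rest[:2] in rest[2:]:
--             return True
--         rest = rest[1:]
--     return False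
-- ===== Notes on version B (the rewrite author's own statement) =====
-- stated objective: simpler
-- what changed: Replaces the dict of first pair indices and the idx-1 overlap bookkeeping by a plain substring scan: for each adjacent pair, test whether it occurs again in the suffix two positions later.
import Mathlib
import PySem

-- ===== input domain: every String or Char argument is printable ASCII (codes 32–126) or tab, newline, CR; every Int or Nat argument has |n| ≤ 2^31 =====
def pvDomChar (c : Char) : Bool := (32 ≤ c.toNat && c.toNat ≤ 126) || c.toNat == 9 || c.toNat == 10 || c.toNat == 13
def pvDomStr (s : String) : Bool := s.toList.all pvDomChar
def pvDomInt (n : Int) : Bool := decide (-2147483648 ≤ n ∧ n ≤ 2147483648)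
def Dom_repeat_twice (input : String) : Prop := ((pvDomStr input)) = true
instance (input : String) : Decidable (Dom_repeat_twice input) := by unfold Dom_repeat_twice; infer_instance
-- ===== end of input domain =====

-- B replaces A's dict of first pair indices (with idx-1 overlap bookkeeping) by a plain
-- substring scan of the suffix two positions later; objective: simpler.

-- ===== PORT A =====
-- pairwise(input): the list of adjacent character pairs
def pvPairwise : List Char → List (Char × Char)
  | a :: b :: r => (a, b) :: pvPairwise (b :: r)
  | _ => []

-- the for-loop over enumerate(pairwise(input)) with the dict `pairs` and early return
def pvLoopA : List (Char × Char) → Int → PySem.Dict (Char × Char) Int → Bool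
  | [], _, _ => false
  | p :: rest, idx, d =>
    match d.get? p with
    | some v => if v ≠ idx - 1 then true else pvLoopA rest (idx + 1) d
    | none => pvLoopA rest (idx + 1) (d.insert p idx)

def repeat_twice (input : String) : Bool :=
  pvLoopA (pvPairwise input.toList) 0 PySem.Dict.empty

-- ===== PORT B =====
-- while len(rest) >= 2: if rest[:2] in rest[2:]: return True; rest = rest[1:]
-- (rest[:2] = [a, b], rest[2:] = r, rest[1:] = b :: r on the pattern a :: b :: r;
--  the substring test `in` is PySem.Chars.isIn)
def pvLoopB : List Char → Bool
  | a :: b :: r => PySem.Chars.isIn [a, b] r || pvLoopB (b :: r)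
  | _ => false

def repeat_twice_alt (input : String) : Bool := pvLoopB input.toList

-- ===== PRECONDITION & SPEC =====
def Spec_repeat_twice (input : String) (out : Bool) : Prop := out = repeat_twice_alt input
instance (input : String) (out : Bool) : Decidable (Spec_repeat_twice input out) := by unfold Spec_repeat_twice; infer_instance

-- ===== CLAIM (what is proved, stated in full; the proofs are below) =====
def Claim_equal_repeat_twice : Prop := ∀ (input : String), Dom_repeat_twice input → Spec_repeat_twice input (repeat_twice input)

-- ===== LEMMAS AND PROOFS =====

-- A pair occurring in the dict and hitting the early-return test somewhere in ps
def pvOldHit (d : PySem.Dict (Char × Char) Int) (idx : Int) (ps : List (Char × Char)) : Prop :=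
  ∃ (p : Char × Char) (v : Int) (k : Nat), d.get? p = some v ∧ ps[k]? = some p ∧ (idx + k : Int) ≠ v + 1

-- a pair repeated in ps with a gap of at least 2
def pvNewRep (ps : List (Char × Char)) : Prop :=
  ∃ (k k' : Nat) (p : Char × Char), k + 2 ≤ k' ∧ ps[k]? = some p ∧ ps[k']? = some p

theorem pvPairwise_tail (b : Char) (r : List Char) :
    (pvPairwise (b :: r)).drop 1 = pvPairwise r := by
  cases r <;> simp [pvPairwise]

theorem pair_infix_iff (r : List Char) (a b : Char) :
    [a, b] <:+: r ↔ (a, b) ∈ pvPairwise r := by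
  induction r with
  | nil => simp [pvPairwise]
  | cons c r' ih =>
    rw [List.infix_cons_iff]
    cases r' with
    | nil =>
      simp [pvPairwise, List.cons_prefix_cons]
    | cons d r'' =>
      simp only [pvPairwise, List.mem_cons, ← ih, List.cons_prefix_cons, List.nil_prefix,
        and_true, Prod.mk.injEq]

theorem pvLoopB_iff : ∀ (cs : List Char), pvLoopB cs = true ↔ pvNewRep (pvPairwise cs)
  | [] => by simp [pvLoopB, pvPairwise, pvNewRep]
  | [a] => by simp [pvLoopB, pvPairwise, pvNewRep]
  | a :: b :: r => by
    have ih := pvLoopB_iff (b :: r)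
    simp only [pvLoopB, Bool.or_eq_true, ih]
    rw [show (PySem.Chars.isIn [a, b] r = true) ↔ (a, b) ∈ pvPairwise r from
        (PySem.Chars.isIn_iff_infix [a, b] r).trans (pair_infix_iff r a b)]
    show _ ∨ _ ↔ pvNewRep ((a, b) :: pvPairwise (b :: r))
    have hmem : (a, b) ∈ pvPairwise r ↔
        ∃ k : Nat, 1 ≤ k ∧ (pvPairwise (b :: r))[k]? = some (a, b) := by
      rw [← pvPairwise_tail b r]
      constructor
      · intro h
        obtain ⟨k, hk⟩ := List.getElem?_of_mem h
        exact ⟨k + 1, by omega, by simpa [List.getElem?_drop] using hk⟩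
      · rintro ⟨k, hk1, hk2⟩
        have hd : ((pvPairwise (b :: r)).drop 1)[k - 1]? = some (a, b) := by
          rw [List.getElem?_drop, show 1 + (k - 1) = k by omega]; exact hk2
        exact List.mem_of_getElem? hd
    constructor
    · rintro (h | ⟨k, k', p, hkk, h1, h2⟩)
      · obtain ⟨k, hk1, hk2⟩ := hmem.mp h
        exact ⟨0, k + 1, (a, b), by omega, by simp, by simpa using hk2⟩
      · exact ⟨k + 1, k' + 1, p, by omega, by simpa using h1, by simpa using h2⟩
    · rintro ⟨k, k', p, hkk, h1, h2⟩
      cases k with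
      | zero =>
        simp only [List.getElem?_cons_zero, Option.some.injEq] at h1
        subst h1
        obtain ⟨k'', rfl⟩ : ∃ k'', k' = k'' + 1 := ⟨k' - 1, by omega⟩
        simp only [List.getElem?_cons_succ] at h2
        exact Or.inl (hmem.mpr ⟨k'', by omega, h2⟩)
      | succ k0 =>
        obtain ⟨k'', rfl⟩ : ∃ k'', k' = k'' + 1 := ⟨k' - 1, by omega⟩
        simp only [List.getElem?_cons_succ] at h1 h2
        exact Or.inr ⟨k0, k'', p, by omega, h1, h2⟩

theorem pvLoopA_iff (ps : List (Char × Char)) : ∀ (idx : Int) (d : PySem.Dict (Char × Char) Int),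
    (∀ p v, d.get? p = some v → v + 1 ≤ idx) →
    (pvLoopA ps idx d = true ↔ pvOldHit d idx ps ∨ pvNewRep ps) := by
  induction ps with
  | nil =>
    intro idx d _
    simp [pvLoopA, pvOldHit, pvNewRep]
  | cons p rest ih =>
    intro idx d hinv
    cases hget : d.get? p with
    | some v =>
      by_cases hv : v = idx - 1
      · subst hv
        rw [show pvLoopA (p :: rest) idx d = pvLoopA rest (idx + 1) d by
              simp [pvLoopA, hget]]
        rw [ih (idx + 1) d (fun q w hw => by have := hinv q w hw; omega)]
        constructor
        · rintro (⟨q, w, k, h1, h2, h3⟩ | ⟨k, k', q, hkk, h1, h2⟩)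
          · exact Or.inl ⟨q, w, k + 1, h1, by simpa using h2, by push_cast at h3 ⊢; omega⟩
          · exact Or.inr ⟨k + 1, k' + 1, q, by omega, by simpa using h1, by simpa using h2⟩
        · rintro (⟨q, w, k, h1, h2, h3⟩ | ⟨k, k', q, hkk, h1, h2⟩)
          · cases k with
            | zero =>
              simp only [List.getElem?_cons_zero, Option.some.injEq] at h2
              subst h2
              rw [hget] at h1
              injection h1 with h1
              exfalso; apply h3; omega
            | succ k0 =>
              simp only [List.getElem?_cons_succ] at h2
              exact Or.inl ⟨q, w, k0, h1, h2, by push_cast at h3 ⊢; omega⟩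
          · cases k with
            | zero =>
              simp only [List.getElem?_cons_zero, Option.some.injEq] at h1
              subst h1
              obtain ⟨k'', rfl⟩ : ∃ k'', k' = k'' + 1 := ⟨k' - 1, by omega⟩
              simp only [List.getElem?_cons_succ] at h2
              exact Or.inl ⟨p, idx - 1, k'', hget, h2, by omega⟩
            | succ k0 =>
              obtain ⟨k'', rfl⟩ : ∃ k'', k' = k'' + 1 := ⟨k' - 1, by omega⟩
              simp only [List.getElem?_cons_succ] at h1 h2
              exact Or.inr ⟨k0, k'', q, by omega, h1, h2⟩
      · rw [show pvLoopA (p :: rest) idx d = true by simp [pvLoopA, hget, hv]]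
        constructor
        · intro _
          exact Or.inl ⟨p, v, 0, hget, by simp, by omega⟩
        · intro _; rfl
    | none =>
      rw [show pvLoopA (p :: rest) idx d = pvLoopA rest (idx + 1) (d.insert p idx) by
            simp [pvLoopA, hget]]
      rw [ih (idx + 1) (d.insert p idx) (fun q w hw => by
            rw [PySem.Dict.get?_insert] at hw
            split at hw
            · injection hw with hw; omega
            · have := hinv q w hw; omega)]
      constructor
      · rintro (⟨q, w, k, h1, h2, h3⟩ | ⟨k, k', q, hkk, h1, h2⟩)
        · rw [PySem.Dict.get?_insert] at h1
          split at h1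
          · rename_i hqp
            subst hqp
            injection h1 with h1
            subst h1
            have hk : 1 ≤ k := by by_contra hk0; omega
            exact Or.inr ⟨0, k + 1, q, by omega, by simp, by simpa using h2⟩
          · exact Or.inl ⟨q, w, k + 1, h1, by simpa using h2, by push_cast at h3 ⊢; omega⟩
        · exact Or.inr ⟨k + 1, k' + 1, q, by omega, by simpa using h1, by simpa using h2⟩
      · rintro (⟨q, w, k, h1, h2, h3⟩ | ⟨k, k', q, hkk, h1, h2⟩)
        · cases k with
          | zero =>
            simp only [List.getElem?_cons_zero, Option.some.injEq] at h2
            subst h2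
            rw [hget] at h1; exact absurd h1 (by simp)
          | succ k0 =>
            simp only [List.getElem?_cons_succ] at h2
            have hqp : q ≠ p := by rintro rfl; rw [hget] at h1; exact absurd h1 (by simp)
            refine Or.inl ⟨q, w, k0, ?_, h2, by push_cast at h3 ⊢; omega⟩
            rw [PySem.Dict.get?_insert]
            simp [hqp, h1]
        · obtain ⟨k'', rfl⟩ : ∃ k'', k' = k'' + 1 := ⟨k' - 1, by omega⟩
          simp only [List.getElem?_cons_succ] at h2
          cases k with
          | zero =>
            simp only [List.getElem?_cons_zero, Option.some.injEq] at h1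
            subst h1
            refine Or.inl ⟨p, idx, k'', ?_, h2, by omega⟩
            rw [PySem.Dict.get?_insert]; simp
          | succ k0 =>
            simp only [List.getElem?_cons_succ] at h1
            exact Or.inr ⟨k0, k'', q, by omega, h1, h2⟩

-- ===== VERDICT (by name: the statement is the Claim_ definition above) =====
theorem repeat_twice_spec : Claim_equal_repeat_twice := by
  unfold Claim_equal_repeat_twice
  intro input _
  unfold Spec_repeat_twice repeat_twice repeat_twice_alt
  rw [Bool.eq_iff_iff]
  rw [pvLoopA_iff _ 0 PySem.Dict.empty (fun p v hv => by simp [PySem.Dict.get?_empty] at hv)]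
  rw [pvLoopB_iff]
  simp [pvOldHit, PySem.Dict.get?_empty]
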